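-- pv_equiv track=rewrite | github.com/ashish01/hn-data-dumps | hn_async2.py | count_range_excluding
-- ===== SOURCE A (Python) =====
-- def normalize_ranges(ranges: list[tuple[int, int]]) -> list[tuple[int, int]]:
--     if not ranges:
--         return []
--     ranges = sorted(ranges, key=lambda entry: entry[0])
--     merged = [ranges[0]]
--     for start_id, end_id in ranges[1:]:
--         last_start, last_end = merged[-1]
--         if start_id <= last_end + 1:
--             merged[-1] = (last_start, max(last_end, end_id))
--         else:
--             merged.append((start_id, end_id))
--     return merged
--
-- def count_range_excluding(
--     start_id: int,
--     end_id: int,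
--     skip_ranges: list[tuple[int, int]],
-- ) -> int:
--     if start_id > end_id:
--         return 0
--     total = end_id - start_id + 1
--     for range_start, range_end in normalize_ranges(skip_ranges):
--         overlap_start = max(start_id, range_start)
--         overlap_end = min(end_id, range_end)
--         if overlap_start <= overlap_end:
--             total -= overlap_end - overlap_start + 1
--     return max(0, total)
-- ===== SOURCE B (Python) =====
-- def _cut(lo, hi, rs, re):
--     # subtract [rs, re] from the free interval [lo, hi]
--     if rs > re or re < lo or rs > hi:
--         return [(lo, hi)]
--     pieces = []
--     if lo < rs:
--         pieces.append((lo, rs - 1))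
--     if re < hi:
--         pieces.append((re + 1, hi))
--     return pieces
--
-- def count_range_excluding(
--     start_id: int,
--     end_id: int,
--     skip_ranges: list[tuple[int, int]],
-- ) -> int:
--     if start_id > end_id:
--         return 0
--     free = [(start_id, end_id)]
--     for rs, re in skip_ranges:
--         free = [piece for lo, hi in free for piece in _cut(lo, hi, rs, re)]
--     return sum(hi - lo + 1 for lo, hi in free)
-- ===== Notes on version B (the rewrite author's own statement) =====
-- stated objective: alternative
-- what changed: B replaces A's sort-then-merge of skip ranges by interval subtraction: it folds each skip range over a list of free sub-intervals of [start_id, end_id], cutting out the overlap, and finally sums the lengths of the surviving pieces; no sorting, merging or final clamping is needed.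
import Mathlib
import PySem

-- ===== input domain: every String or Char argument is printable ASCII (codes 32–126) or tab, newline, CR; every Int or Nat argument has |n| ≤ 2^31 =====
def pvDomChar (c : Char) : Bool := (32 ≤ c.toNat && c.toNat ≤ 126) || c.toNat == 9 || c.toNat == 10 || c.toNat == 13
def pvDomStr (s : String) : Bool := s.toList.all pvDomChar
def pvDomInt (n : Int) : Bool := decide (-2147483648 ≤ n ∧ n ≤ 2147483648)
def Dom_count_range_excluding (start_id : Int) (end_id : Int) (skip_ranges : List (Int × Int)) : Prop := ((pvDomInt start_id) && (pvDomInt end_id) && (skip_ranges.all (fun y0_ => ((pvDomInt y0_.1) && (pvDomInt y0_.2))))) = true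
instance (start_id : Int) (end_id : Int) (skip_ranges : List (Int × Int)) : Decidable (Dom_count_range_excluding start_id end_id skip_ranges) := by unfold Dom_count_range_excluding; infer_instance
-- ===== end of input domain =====

-- B counts the surviving integers by interval subtraction (cutting each skip range out of a
-- list of free sub-intervals) instead of A's sort-and-merge; alternative algorithm, not faster.

-- ===== PORT A =====
-- merged[-1] is carried as the second state component (merged = state.1 ++ [state.2]).
def normalize_ranges (ranges : List (Int × Int)) : List (Int × Int) :=
  if ranges = [] then []
  else
    match PySem.List.sorted ranges (fun e => e.1) with
    | [] => []
    | r0 :: rest =>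
      let st := rest.foldl
        (fun (m : List (Int × Int) × (Int × Int)) p =>
          if p.1 ≤ m.2.2 + 1 then (m.1, (m.2.1, max m.2.2 p.2))
          else (m.1 ++ [m.2], p))
        ([], r0)
      st.1 ++ [st.2]

def count_range_excluding (start_id : Int) (end_id : Int) (skip_ranges : List (Int × Int)) : Int :=
  if start_id > end_id then 0
  else
    let total := (normalize_ranges skip_ranges).foldl
      (fun total p =>
        let overlap_start := max start_id p.1
        let overlap_end := min end_id p.2
        if overlap_start ≤ overlap_end then total - (overlap_end - overlap_start + 1) else total)
      (end_id - start_id + 1)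
    max 0 total

-- ===== PORT B =====
def pvCut (lo hi rs re : Int) : List (Int × Int) :=
  if rs > re ∨ re < lo ∨ rs > hi then [(lo, hi)]
  else (if lo < rs then [(lo, rs - 1)] else []) ++ (if re < hi then [(re + 1, hi)] else [])

def count_range_excluding_alt (start_id : Int) (end_id : Int) (skip_ranges : List (Int × Int)) : Int :=
  if start_id > end_id then 0
  else
    let free := skip_ranges.foldl
      (fun fr p => fr.flatMap (fun q => pvCut q.1 q.2 p.1 p.2))
      [(start_id, end_id)]
    free.foldl (fun s q => s + (q.2 - q.1 + 1)) 0

-- ===== PRECONDITION & SPEC =====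
def Spec_count_range_excluding (start_id : Int) (end_id : Int) (skip_ranges : List (Int × Int)) (out : Int) : Prop := out = count_range_excluding_alt start_id end_id skip_ranges
instance (start_id : Int) (end_id : Int) (skip_ranges : List (Int × Int)) (out : Int) : Decidable (Spec_count_range_excluding start_id end_id skip_ranges out) := by unfold Spec_count_range_excluding; infer_instance

-- ===== CLAIM (what is proved, stated in full; the proofs are below) =====
def Claim_equal_count_range_excluding : Prop := ∀ (start_id : Int) (end_id : Int) (skip_ranges : List (Int × Int)), Dom_count_range_excluding start_id end_id skip_ranges → Spec_count_range_excluding start_id end_id skip_ranges (count_range_excluding start_id end_id skip_ranges)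

-- ===== LEMMAS AND PROOFS =====

-- x is covered by some skip range of rs
def pvCov (rs : List (Int × Int)) (x : Int) : Bool :=
  rs.any (fun p => decide (p.1 ≤ x) && decide (x ≤ p.2))

-- number of integers in [lo, hi] covered by no range of rs
noncomputable def pvFree (lo hi : Int) (rs : List (Int × Int)) : Int :=
  (((Finset.Icc lo hi).filter (fun x => pvCov rs x = false)).card : Int)

noncomputable def pvCovered (lo hi : Int) (rs : List (Int × Int)) : Int :=
  (((Finset.Icc lo hi).filter (fun x => pvCov rs x = true)).card : Int)

def pvClamp (s e : Int) (p : Int × Int) : Int :=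
  if max s p.1 ≤ min e p.2 then min e p.2 - max s p.1 + 1 else 0

theorem pvFree_nonneg (lo hi : Int) (rs : List (Int × Int)) : 0 ≤ pvFree lo hi rs := by
  simp [pvFree]

theorem pvFree_nil (lo hi : Int) (h : lo ≤ hi) : pvFree lo hi [] = hi - lo + 1 := by
  simp [pvFree, pvCov, Int.card_Icc]
  omega

theorem pvFree_congr (lo hi : Int) (M N : List (Int × Int))
    (h : ∀ x, pvCov M x = pvCov N x) : pvFree lo hi M = pvFree lo hi N := by
  unfold pvFree
  have hf : ((Finset.Icc lo hi).filter (fun x => pvCov M x = false))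
      = ((Finset.Icc lo hi).filter (fun x => pvCov N x = false)) :=
    Finset.filter_congr (fun x _ => by rw [h x])
  rw [hf]

theorem pvCov_cons (a b x : Int) (l : List (Int × Int)) :
    pvCov ((a, b) :: l) x = ((decide (a ≤ x) && decide (x ≤ b)) || pvCov l x) := by
  simp [pvCov]

-- one cut step preserves the free count
theorem pvCut_free (lo hi rs re : Int) (rest : List (Int × Int)) :
    ((pvCut lo hi rs re).map (fun q => pvFree q.1 q.2 rest)).sum
      = pvFree lo hi ((rs, re) :: rest) := by
  by_cases h : rs > re ∨ re < lo ∨ rs > hi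
  · rw [pvCut, if_pos h]
    simp only [List.map_cons, List.map_nil, List.sum_cons, List.sum_nil, add_zero]
    unfold pvFree
    have hf : ((Finset.Icc lo hi).filter (fun x => pvCov rest x = false))
        = ((Finset.Icc lo hi).filter (fun x => pvCov ((rs, re) :: rest) x = false)) := by
      apply Finset.filter_congr
      intro x hx
      simp only [Finset.mem_Icc] at hx
      have hfalse : (decide (rs ≤ x) && decide (x ≤ re)) = false := by
        simp only [Bool.and_eq_false_iff, decide_eq_false_iff_not]
        omega
      rw [pvCov_cons, hfalse, Bool.false_or]
    rw [hf]
  · push_neg at h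
    obtain ⟨h1, h2, h3⟩ := h
    have hdis : Disjoint ((Finset.Icc lo (rs - 1)).filter (fun x => pvCov rest x = false))
        ((Finset.Icc (re + 1) hi).filter (fun x => pvCov rest x = false)) := by
      rw [Finset.disjoint_left]
      intro x hx1 hx2
      simp only [Finset.mem_filter, Finset.mem_Icc] at hx1 hx2
      omega
    have hset : (Finset.Icc lo hi).filter (fun x => pvCov ((rs, re) :: rest) x = false)
        = ((Finset.Icc lo (rs - 1)).filter (fun x => pvCov rest x = false))
          ∪ ((Finset.Icc (re + 1) hi).filter (fun x => pvCov rest x = false)) := by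
      ext x
      simp only [Finset.mem_filter, Finset.mem_union, Finset.mem_Icc, pvCov_cons,
        Bool.or_eq_false_iff, Bool.and_eq_false_iff, decide_eq_false_iff_not]
      constructor
      · rintro ⟨⟨hx1, hx2⟩, hab, hq⟩
        rcases hab with hb | hb
        · exact Or.inl ⟨⟨hx1, by omega⟩, hq⟩
        · exact Or.inr ⟨⟨by omega, hx2⟩, hq⟩
      · rintro (⟨⟨hx1, hx2⟩, hq⟩ | ⟨⟨hx1, hx2⟩, hq⟩)
        · exact ⟨⟨hx1, by omega⟩, Or.inl (by omega), hq⟩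
        · exact ⟨⟨by omega, hx2⟩, Or.inr (by omega), hq⟩
    have hempty1 : ¬ lo < rs →
        ((Finset.Icc lo (rs - 1)).filter (fun x => pvCov rest x = false)).card = 0 := by
      intro hl
      rw [Finset.Icc_eq_empty (by omega)]
      simp
    have hempty2 : ¬ re < hi →
        ((Finset.Icc (re + 1) hi).filter (fun x => pvCov rest x = false)).card = 0 := by
      intro hl
      rw [Finset.Icc_eq_empty (by omega)]
      simp
    rw [pvCut, if_neg (by omega)]
    simp only [pvFree]
    rw [hset, Finset.card_union_of_disjoint hdis]
    push_cast
    by_cases hl : lo < rs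
    · by_cases hr : re < hi
      · simp [hl, hr]
      · simp [hl, hr, hempty2 hr]
    · by_cases hr : re < hi
      · simp [hl, hr, hempty1 hl]
      · simp [hl, hr, hempty1 hl, hempty2 hr]

-- sum over flatMap
theorem sum_map_flatMap {α β : Type} (l : List α) (f : α → List β) (g : β → Int) :
    ((l.flatMap f).map g).sum = (l.map (fun a => ((f a).map g).sum)).sum := by
  induction l with
  | nil => simp
  | cons a t ih => simp [List.flatMap_cons, ih]

theorem pvCut_valid (lo hi rs re : Int) (h : lo ≤ hi) :
    ∀ q ∈ pvCut lo hi rs re, q.1 ≤ q.2 := by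
  rintro ⟨a, b⟩ hq
  unfold pvCut at hq
  split at hq
  · simp only [List.mem_singleton, Prod.mk.injEq] at hq
    omega
  · rcases List.mem_append.1 hq with h1 | h1 <;>
      (split at h1 <;> simp only [List.mem_singleton, List.not_mem_nil, Prod.mk.injEq] at h1) <;>
      omega

-- B's main loop
theorem pvB_loop (ranges : List (Int × Int)) :
    ∀ free : List (Int × Int), (∀ q ∈ free, q.1 ≤ q.2) →
    ((ranges.foldl (fun fr p => fr.flatMap (fun q => pvCut q.1 q.2 p.1 p.2)) free).map
        (fun q => q.2 - q.1 + 1)).sum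
      = (free.map (fun q => pvFree q.1 q.2 ranges)).sum := by
  induction ranges with
  | nil =>
    intro free hv
    simp only [List.foldl_nil]
    apply congrArg
    apply List.map_congr_left
    intro q hq
    rw [pvFree_nil _ _ (hv q hq)]
  | cons p t ih =>
    intro free hv
    simp only [List.foldl_cons]
    have hv' : ∀ q ∈ free.flatMap (fun q => pvCut q.1 q.2 p.1 p.2), q.1 ≤ q.2 := by
      intro q hq
      rcases List.mem_flatMap.1 hq with ⟨r, hr, hq'⟩
      exact pvCut_valid _ _ _ _ (hv r hr) q hq'
    rw [ih _ hv']
    rw [sum_map_flatMap]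
    apply congrArg
    apply List.map_congr_left
    intro q _
    exact pvCut_free q.1 q.2 p.1 p.2 t

theorem foldl_sumlen (l : List (Int × Int)) :
    ∀ s : Int, l.foldl (fun s q => s + (q.2 - q.1 + 1)) s = s + (l.map (fun q => q.2 - q.1 + 1)).sum := by
  induction l with
  | nil => intro s; simp
  | cons q t ih => intro s; simp [ih]; ring

-- A's subtraction loop
theorem foldl_clamp (s e : Int) (l : List (Int × Int)) :
    ∀ t : Int, l.foldl
      (fun total p =>
        let overlap_start := max s p.1
        let overlap_end := min e p.2
        if overlap_start ≤ overlap_end then total - (overlap_end - overlap_start + 1) else total) t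
      = t - (l.map (pvClamp s e)).sum := by
  induction l with
  | nil => intro t; simp
  | cons p l ih =>
    intro t
    simp only [List.foldl_cons, List.map_cons, List.sum_cons]
    rw [ih]
    simp only [pvClamp]
    split <;> ring

theorem pvClamp_card (s e : Int) (p : Int × Int) :
    pvClamp s e p = (((Finset.Icc s e).filter (fun x => (decide (p.1 ≤ x) && decide (x ≤ p.2)) = true)).card : Int) := by
  have hset : (Finset.Icc s e).filter (fun x => (decide (p.1 ≤ x) && decide (x ≤ p.2)) = true)
      = Finset.Icc (max s p.1) (min e p.2) := by
    ext x
    simp only [Finset.mem_filter, Finset.mem_Icc, Bool.and_eq_true, decide_eq_true_eq]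
    omega
  rw [hset, Int.card_Icc]
  unfold pvClamp
  split <;> omega

theorem clamp_sum_covered (s e : Int) (M : List (Int × Int))
    (hM : M.Pairwise (fun p q => p.2 < q.1)) :
    (M.map (pvClamp s e)).sum = pvCovered s e M := by
  induction M with
  | nil => simp [pvCovered, pvCov]
  | cons p M ih =>
    obtain ⟨hp, hMpw⟩ := List.pairwise_cons.1 hM
    have hdis : Disjoint ((Finset.Icc s e).filter (fun x => (decide (p.1 ≤ x) && decide (x ≤ p.2)) = true))
        ((Finset.Icc s e).filter (fun x => pvCov M x = true)) := by
      rw [Finset.disjoint_left]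
      intro x hx1 hx2
      simp only [Finset.mem_filter, Bool.and_eq_true, decide_eq_true_eq] at hx1
      simp only [Finset.mem_filter, pvCov, List.any_eq_true, Bool.and_eq_true,
        decide_eq_true_eq] at hx2
      obtain ⟨q, hq, hq1, hq2⟩ := hx2.2
      have := hp q hq
      omega
    have hsplit : (Finset.Icc s e).filter (fun x => pvCov (p :: M) x = true)
        = ((Finset.Icc s e).filter (fun x => (decide (p.1 ≤ x) && decide (x ≤ p.2)) = true))
          ∪ ((Finset.Icc s e).filter (fun x => pvCov M x = true)) := by
      ext x
      simp only [Finset.mem_filter, Finset.mem_union]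
      have : pvCov (p :: M) x = ((decide (p.1 ≤ x) && decide (x ≤ p.2)) || pvCov M x) := by
        simp [pvCov]
      rw [this]
      simp only [Bool.or_eq_true]
      tauto
    unfold pvCovered
    rw [hsplit, Finset.card_union_of_disjoint hdis]
    simp only [List.map_cons, List.sum_cons]
    rw [ih hMpw, pvClamp_card]
    unfold pvCovered
    push_cast
    ring

theorem free_add_covered (s e : Int) (h : s ≤ e) (M : List (Int × Int)) :
    pvFree s e M + pvCovered s e M = e - s + 1 := by
  have h1 := Finset.card_filter_add_card_filter_not
    (s := Finset.Icc s e) (p := fun x => pvCov M x = true)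
  simp only [Bool.not_eq_true] at h1
  have h2 : (Finset.Icc s e).card = (e + 1 - s).toNat := Int.card_Icc s e
  unfold pvFree pvCovered
  omega

-- normalize fold invariant
def pvMerge (st : List (Int × Int) × (Int × Int)) (rest : List (Int × Int)) :
    List (Int × Int) × (Int × Int) :=
  rest.foldl
    (fun (m : List (Int × Int) × (Int × Int)) p =>
      if p.1 ≤ m.2.2 + 1 then (m.1, (m.2.1, max m.2.2 p.2))
      else (m.1 ++ [m.2], p))
    st

theorem norm_fold (rest : List (Int × Int)) :
    ∀ (acc : List (Int × Int)) (last : Int × Int),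
    (acc ++ [last]).Pairwise (fun p q => p.2 < q.1) →
    (∀ q ∈ rest, last.1 ≤ q.1) →
    rest.Pairwise (fun a b => a.1 ≤ b.1) →
    (((pvMerge (acc, last) rest).1 ++ [(pvMerge (acc, last) rest).2]).Pairwise
        (fun p q => p.2 < q.1)) ∧
      ∀ x : Int, pvCov ((pvMerge (acc, last) rest).1 ++ [(pvMerge (acc, last) rest).2]) x
        = (pvCov (acc ++ [last]) x || pvCov rest x) := by
  induction rest with
  | nil =>
    intro acc last h1 _ _
    refine ⟨h1, fun x => ?_⟩
    simp [pvMerge, pvCov]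
  | cons q rest ih =>
    intro acc last h1 h2 h3
    obtain ⟨h3a, h3b⟩ := List.pairwise_cons.1 h3
    have hlast_q : last.1 ≤ q.1 := h2 q List.mem_cons_self
    by_cases hc : q.1 ≤ last.2 + 1
    · -- merge q into last
      have hstep : pvMerge (acc, last) (q :: rest)
          = pvMerge (acc, (last.1, max last.2 q.2)) rest := by
        simp [pvMerge, hc]
      have h1' : (acc ++ [(last.1, max last.2 q.2)]).Pairwise (fun p q => p.2 < q.1) := by
        simp only [List.pairwise_append, List.pairwise_cons, List.mem_singleton] at h1 ⊢
        exact ⟨h1.1, by simp, fun a ha b hb => by subst hb; exact h1.2.2 a ha last rfl⟩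
      have h2' : ∀ r ∈ rest, (last.1, max last.2 q.2).1 ≤ r.1 :=
        fun r hr => h2 r (List.mem_cons_of_mem _ hr)
      obtain ⟨ha, hb⟩ := ih acc (last.1, max last.2 q.2) h1' h2' h3b
      rw [hstep]
      refine ⟨ha, fun x => ?_⟩
      rw [hb x]
      simp only [pvCov, List.any_append, List.any_cons, List.any_nil, Bool.or_false]
      rw [Bool.eq_iff_iff]
      simp only [Bool.or_eq_true, Bool.and_eq_true, decide_eq_true_eq]
      constructor
      · rintro ((hA | hL) | hR)
        · exact Or.inl (Or.inl hA)
        · by_cases hm : x ≤ last.2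
          · exact Or.inl (Or.inr ⟨hL.1, hm⟩)
          · exact Or.inr (Or.inl ⟨by omega, by omega⟩)
        · exact Or.inr (Or.inr hR)
      · rintro ((hA | hL) | (hQ | hR))
        · exact Or.inl (Or.inl hA)
        · exact Or.inl (Or.inr ⟨hL.1, by omega⟩)
        · exact Or.inl (Or.inr ⟨by omega, by omega⟩)
        · exact Or.inr hR
    · -- append a new interval
      have hstep : pvMerge (acc, last) (q :: rest) = pvMerge (acc ++ [last], q) rest := by
        simp [pvMerge, hc]
      have h1' : ((acc ++ [last]) ++ [q]).Pairwise (fun p q => p.2 < q.1) := by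
        simp only [List.pairwise_append, List.pairwise_cons, List.mem_singleton,
          List.mem_append] at h1 ⊢
        refine ⟨⟨h1.1, by simp, h1.2.2⟩, by simp, ?_⟩
        rintro a (ha | ha) b hb
        · subst hb
          have := h1.2.2 a ha last rfl
          omega
        · subst ha hb
          omega
      have h2' : ∀ r ∈ rest, q.1 ≤ r.1 := h3a
      obtain ⟨ha, hb⟩ := ih (acc ++ [last]) q h1' h2' h3b
      rw [hstep]
      refine ⟨ha, fun x => ?_⟩
      rw [hb x]
      simp only [pvCov, List.any_append, List.any_cons, List.any_nil, Bool.or_false]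
      rw [Bool.eq_iff_iff]
      simp only [Bool.or_eq_true]
      tauto

theorem normalize_spec (r : List (Int × Int)) :
    (normalize_ranges r).Pairwise (fun p q => p.2 < q.1) ∧
    ∀ x : Int, pvCov (normalize_ranges r) x = pvCov r x := by
  by_cases hr : r = []
  · subst hr
    simp [normalize_ranges, pvCov]
  · unfold normalize_ranges
    rw [if_neg hr]
    rcases hs : PySem.List.sorted r (fun e => e.1) with _ | ⟨r0, rest⟩
    · exact absurd ((PySem.List.sorted_eq_nil_iff _ _ _).1 hs) hr
    · have hpw := PySem.List.sorted_pairwise (xs := r) (key := fun e => e.1)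
      rw [hs] at hpw
      obtain ⟨hhead, htail⟩ := List.pairwise_cons.1 hpw
      have hperm : (r0 :: rest).Perm r := by
        have := PySem.List.sorted_perm (xs := r) (key := fun e => e.1) (rev := false)
        rwa [hs] at this
      obtain ⟨ha, hb⟩ := norm_fold rest [] r0 (by simp) hhead htail
      constructor
      · exact ha
      · intro x
        have hx := hb x
        have hcov_perm : pvCov (r0 :: rest) x = pvCov r x := by
          rw [Bool.eq_iff_iff]
          simp only [pvCov, List.any_eq_true]
          exact ⟨fun ⟨p, hp, hh⟩ => ⟨p, hperm.mem_iff.1 hp, hh⟩,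
                 fun ⟨p, hp, hh⟩ => ⟨p, hperm.mem_iff.2 hp, hh⟩⟩
        show pvCov ((pvMerge ([], r0) rest).1 ++ [(pvMerge ([], r0) rest).2]) x = pvCov r x
        rw [hx, ← hcov_perm]
        simp [pvCov]

-- ===== VERDICT (by name: the statement is the Claim_ definition above) =====
theorem count_range_excluding_spec : Claim_equal_count_range_excluding := by
  intro s e sk _
  unfold Spec_count_range_excluding
  by_cases hse : s > e
  · simp [count_range_excluding, count_range_excluding_alt, hse]
  · have hle : s ≤ e := by omega
    obtain ⟨hpw, hcov⟩ := normalize_spec sk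
    have hA : count_range_excluding s e sk = pvFree s e sk := by
      unfold count_range_excluding
      rw [if_neg hse, foldl_clamp]
      rw [clamp_sum_covered s e _ hpw]
      show max 0 (e - s + 1 - pvCovered s e (normalize_ranges sk)) = pvFree s e sk
      have h1 := free_add_covered s e hle (normalize_ranges sk)
      have h2 := pvFree_nonneg s e (normalize_ranges sk)
      have h3 : pvFree s e (normalize_ranges sk) = pvFree s e sk :=
        pvFree_congr _ _ _ _ hcov
      omega
    have hB : count_range_excluding_alt s e sk = pvFree s e sk := by
      unfold count_range_excluding_alt
      rw [if_neg hse, foldl_sumlen,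
        pvB_loop sk [(s, e)] (by intro q hq; simp only [List.mem_singleton] at hq; subst hq; simpa using hle)]
      simp
    rw [hA, hB]
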